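-- pv_equiv track=rewrite | github.com/yuxundu/leetcode | Graph/261. Graph Valid Tree/code.py | validTree
-- ===== SOURCE A (Python) =====
-- from typing import List
--
-- def validTree(n: int, edges: List[List[int]]) -> bool:
--     adjacent = { i :[] for i in range(n)}
--     for edge in edges:
--         adjacent[edge[0]].append(edge[1])
--         adjacent[edge[1]].append(edge[0])
--
--     visiting = set()
--
--     def dfs(i:int, pre:int):
--         if i in visiting:
--             return False
--         visiting.add(i)
--
--         for value in adjacent[i]:
--             if value == pre:
--                 continue
--             if not dfs(value,i):
--                 return False
--
--         return True
--
--     if not dfs(0,-1):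
--         return False;
--
--     return True if len(visiting) == n else False
-- ===== SOURCE B (Python) =====
-- from typing import List
--
-- def validTree(n: int, edges: List[List[int]]) -> bool:
--     # Iterative DFS with an explicit (node, parent) stack instead of recursion.
--     adjacent = {i: [] for i in range(n)}
--     for edge in edges:
--         adjacent[edge[0]].append(edge[1])
--         adjacent[edge[1]].append(edge[0])
--
--     visiting = set()
--     stack = [(0, -1)]
--     while stack:
--         i, pre = stack.pop()
--         if i in visiting:
--             return False
--         visiting.add(i)
--         for value in reversed(adjacent[i]):
--             if value != pre:
--                 stack.append((value, i))
--
--     return len(visiting) == n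
-- ===== Notes on version B (the rewrite author's own statement) =====
-- stated objective: alternative
-- what changed: Replaces A's recursive closure-based DFS (with an implicit visited-set mutation and bubbling booleans) by an iterative DFS driven by an explicit stack of (node, parent) pairs with the revisit check done at pop time; no recursion, single loop, single final length check.
import Mathlib
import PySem

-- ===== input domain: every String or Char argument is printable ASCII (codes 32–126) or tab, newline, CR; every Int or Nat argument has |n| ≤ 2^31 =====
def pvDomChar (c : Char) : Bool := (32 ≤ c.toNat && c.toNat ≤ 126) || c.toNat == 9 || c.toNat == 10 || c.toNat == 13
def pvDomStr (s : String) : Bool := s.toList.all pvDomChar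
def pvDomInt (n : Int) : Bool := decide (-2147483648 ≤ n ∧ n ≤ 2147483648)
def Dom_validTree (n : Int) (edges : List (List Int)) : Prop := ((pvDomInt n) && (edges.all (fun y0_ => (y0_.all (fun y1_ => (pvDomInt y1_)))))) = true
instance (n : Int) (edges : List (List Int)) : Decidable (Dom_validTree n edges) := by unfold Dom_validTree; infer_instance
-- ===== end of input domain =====

-- B replaces A's recursive DFS by an explicit-stack iterative DFS (same return value; A mutates nothing observable).

-- ===== PORT A =====

-- shared by both ports: both Pythons build the adjacency dict with identical code.
-- `adjacent = {i: [] for i in range(n)}` then two appends per edge (`d[k].append(x)` = modify;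
-- on a missing key Python raises KeyError — excluded by Pre_ — while `modify` inserts).
def pvBuildAdj (n : Int) (edges : List (List Int)) : PySem.Dict Int (List Int) :=
  edges.foldl
    (fun d e =>
      let a := PySem.List.pyGetD e 0 0   -- edge[0] (IndexError on short edges is excluded by Pre_)
      let b := PySem.List.pyGetD e 1 0   -- edge[1]
      (d.modify a [] (· ++ [b])).modify b [] (· ++ [a]))
    ((PySem.List.pyRange 0 n 1).foldl (fun d i => d.insert i ([] : List Int)) PySem.Dict.empty)

-- potential: Σ over dict entries with unvisited key of (1 + degree).  Used as A's recursion fuel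
-- (a pure totality device: the fuel is provably never exhausted) and as B's termination measure.
def pvPotAux (items : List (Int × List Int)) (vis : List Int) : Nat :=
  items.foldr (fun p acc => if p.1 ∈ vis then acc else 1 + p.2.length + acc) 0

def pvPot (adj : PySem.Dict Int (List Int)) (vis : List Int) : Nat :=
  pvPotAux adj.items vis

-- the `for value in adjacent[i]` loop of A's dfs: skip `value == pre`, recurse via `rec`
def pvDfsGo (pre : Int) (rec : Int → List Int → Bool × List Int) :
    List Int → List Int → Bool × List Int
  | [], vis => (true, vis)
  | v :: rest, vis =>
    if v == pre then pvDfsGo pre rec rest vis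
    else
      match rec v vis with
      | (false, vis') => (false, vis')
      | (true, vis') => pvDfsGo pre rec rest vis'

-- A's recursive dfs (visiting is threaded instead of mutated; fuel only for totality)
def pvDfsA (adj : PySem.Dict Int (List Int)) : Nat → Int → Int → List Int → Bool × List Int
  | 0, _, _, vis => (true, vis)
  | f + 1, i, pre, vis =>
    if PySem.Set.contains vis i then (false, vis)
    else pvDfsGo pre (fun v vis' => pvDfsA adj f v i vis') (adj.getD i []) (PySem.Set.add vis i)

def validTree (n : Int) (edges : List (List Int)) : Bool :=
  let adj := pvBuildAdj n edges
  let r := pvDfsA adj (pvPot adj [] + 1) 0 (-1) []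
  if !r.1 then false
  else decide ((r.2.length : Int) = n)

-- ===== PORT B =====

-- two lemmas the port's termination proof cites by name
theorem pvPotAux_cons (p : Int × List Int) (rest : List (Int × List Int)) (vis : List Int) :
    pvPotAux (p :: rest) vis = (if p.1 ∈ vis then 0 else 1 + p.2.length) + pvPotAux rest vis := by
  by_cases h : p.1 ∈ vis <;> simp [pvPotAux, h]

theorem pvPotAux_mono (items : List (Int × List Int)) {vis vis' : List Int}
    (h : ∀ x, x ∈ vis → x ∈ vis') : pvPotAux items vis' ≤ pvPotAux items vis := by
  induction items with
  | nil => simp [pvPotAux]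
  | cons p rest ih =>
    rw [pvPotAux_cons, pvPotAux_cons]
    by_cases h1 : p.1 ∈ vis
    · rw [if_pos h1, if_pos (h _ h1)]; omega
    · rw [if_neg h1]
      by_cases h2 : p.1 ∈ vis' <;> [rw [if_pos h2]; rw [if_neg h2]] <;> omega

theorem pvPotAux_drop (items : List (Int × List Int)) (i : Int) (l : List Int)
    (vis : List Int) (hmem : (i, l) ∈ items) (hvis : i ∉ vis) :
    l.length + pvPotAux items (PySem.Set.add vis i) < pvPotAux items vis := by
  have hsub : ∀ x, x ∈ vis → x ∈ PySem.Set.add vis i :=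
    fun x hx => (PySem.Set.mem_add _ _ _).2 (Or.inl hx)
  induction items with
  | nil => simp at hmem
  | cons p rest ih =>
    rw [pvPotAux_cons, pvPotAux_cons]
    rcases List.mem_cons.1 hmem with heq | hmem'
    · have hp1 : p.1 = i := by rw [← heq]
      have h1 : p.1 ∈ PySem.Set.add vis i := by
        rw [hp1]; exact (PySem.Set.mem_add _ _ _).2 (Or.inr rfl)
      have h0 : p.1 ∉ vis := by rw [hp1]; exact hvis
      have h2 := pvPotAux_mono (vis := vis) (vis' := PySem.Set.add vis i) rest hsub
      have hlen : p.2.length = l.length := by rw [← heq]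
      rw [if_pos h1, if_neg h0, hlen]; omega
    · have h3 := ih hmem'
      by_cases h1 : p.1 ∈ vis
      · rw [if_pos h1, if_pos (hsub _ h1)]; omega
      · rw [if_neg h1]
        by_cases h2 : p.1 ∈ PySem.Set.add vis i <;> [rw [if_pos h2]; rw [if_neg h2]] <;> omega

theorem pvPot_add_lt (adj : PySem.Dict Int (List Int)) {i : Int} {l : List Int} {vis : List Int}
    (hget : adj.getD i [] = l) (hne : l ≠ []) (hvis : i ∉ vis) :
    l.length + pvPot adj (PySem.Set.add vis i) < pvPot adj vis := by
  have hsome : adj.get? i = some l := by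
    have := PySem.Dict.getD_eq_get?_getD adj i ([] : List Int)
    cases hg : adj.get? i with
    | none => rw [hg] at this; simp at this; rw [hget] at this; exact absurd this hne
    | some v => rw [hg] at this; simp at this; rw [hget] at this; rw [this]
  exact pvPotAux_drop adj.items i l vis (PySem.Dict.mem_items_of_get?_eq_some _ hsome) hvis

-- B's while loop: stack of (node, parent) pairs; Python pushes `reversed(adjacent[i])` and pops
-- from the end of the list, which is exactly this front-of-list stack.
def pvLoopB (adj : PySem.Dict Int (List Int)) (n : Int) :
    List (Int × Int) → List Int → Bool
  | [], vis => decide ((vis.length : Int) = n)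
  | (i, pre) :: rest, vis =>
    if PySem.Set.contains vis i then false
    else
      pvLoopB adj n
        (((adj.getD i []).filter (fun v => v != pre)).map (fun v => (v, i)) ++ rest)
        (PySem.Set.add vis i)
  termination_by stack vis => stack.length + pvPot adj vis
  decreasing_by
    rename_i hc
    simp only [List.length_append, List.length_map, List.length_cons]
    have hvis : i ∉ vis := by
      simpa [PySem.Set.contains_iff] using hc
    by_cases hl : adj.getD i [] = []
    · have : pvPot adj (PySem.Set.add vis i) ≤ pvPot adj vis := by
        apply pvPotAux_mono
        intro x hx
        exact (PySem.Set.mem_add _ _ _).2 (Or.inl hx)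
      simp [hl]; omega
    · have h1 : ((adj.getD i []).filter (fun v => v != pre)).length ≤ (adj.getD i []).length :=
        List.length_filter_le _ _
      have h2 := pvPot_add_lt adj rfl hl hvis
      omega

def validTree_alt (n : Int) (edges : List (List Int)) : Bool :=
  let adj := pvBuildAdj n edges
  pvLoopB adj n [(0, -1)] []

-- ===== PRECONDITION & SPEC =====
-- Pre_ excludes exactly the inputs where the Python A raises: n ≤ 0 (dfs(0,·) hits KeyError),
-- an edge shorter than 2 (IndexError), or an endpoint outside range(n) (KeyError).
def Pre_validTree (n : Int) (edges : List (List Int)) : Prop :=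
  1 ≤ n ∧ ∀ e ∈ edges, 2 ≤ e.length ∧
    0 ≤ PySem.List.pyGetD e 0 0 ∧ PySem.List.pyGetD e 0 0 < n ∧
    0 ≤ PySem.List.pyGetD e 1 0 ∧ PySem.List.pyGetD e 1 0 < n
instance (n : Int) (edges : List (List Int)) : Decidable (Pre_validTree n edges) := by
  unfold Pre_validTree; infer_instance

def pvWitness_validTree : Int × List (List Int) := (3, [[0, 1], [1, 2]])

def Spec_validTree (n : Int) (edges : List (List Int)) (out : Bool) : Prop := out = validTree_alt n edges
instance (n : Int) (edges : List (List Int)) (out : Bool) : Decidable (Spec_validTree n edges out) := by unfold Spec_validTree; infer_instance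

-- ===== CLAIM (what is proved, stated in full; the proofs are below) =====
def Claim_equal_validTree : Prop := ∀ (n : Int) (edges : List (List Int)), Dom_validTree n edges → Pre_validTree n edges → Spec_validTree n edges (validTree n edges)

-- ===== LEMMAS AND PROOFS =====

-- visiting only grows
theorem pvDfsGo_grow (pre : Int) (rec : Int → List Int → Bool × List Int)
    (hrec : ∀ v vis, vis ⊆ (rec v vis).2) :
    ∀ (l vis : List Int), vis ⊆ (pvDfsGo pre rec l vis).2 := by
  intro l
  induction l with
  | nil => intro vis; simp [pvDfsGo]
  | cons v rest ih =>
    intro vis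
    by_cases hv : v == pre
    · simpa [pvDfsGo, hv] using ih vis
    · simp only [pvDfsGo, hv, Bool.false_eq_true, reduceIte]
      cases hr : rec v vis with
      | mk b vis' =>
        have h1 : vis ⊆ vis' := by have := hrec v vis; rw [hr] at this; exact this
        cases b
        · simpa using h1
        · exact h1.trans (ih vis')

theorem pvDfsA_grow (adj : PySem.Dict Int (List Int)) :
    ∀ (f : Nat) (i pre : Int) (vis : List Int), vis ⊆ (pvDfsA adj f i pre vis).2 := by
  intro f
  induction f with
  | zero => intro i pre vis; simp [pvDfsA]
  | succ f ih =>
    intro i pre vis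
    by_cases hc : i ∈ vis
    · simp [pvDfsA, hc]
    · simp only [pvDfsA, hc, PySem.Set.contains_eq_listContains, List.contains_eq_mem,
        decide_eq_true_eq, if_neg hc]
      have h1 : vis ⊆ PySem.Set.add vis i :=
        fun x hx => (PySem.Set.mem_add _ _ _).2 (Or.inl hx)
      exact h1.trans (pvDfsGo_grow pre _ (fun v vis' => ih v i vis') _ _)

-- simulation of A's neighbour loop by B's pushed frames (hMain = outer induction hypothesis)
theorem pvSub (adj : PySem.Dict Int (List Int)) (n : Int) (f : Nat) (i pre : Int)
    (hMain : ∀ (i' pre' : Int) (vis : List Int) (K : List (Int × Int)),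
      pvPot adj vis + 1 ≤ f →
      pvLoopB adj n ((i', pre') :: K) vis =
        (match pvDfsA adj f i' pre' vis with
         | (false, _) => false
         | (true, vis') => pvLoopB adj n K vis')) :
    ∀ (rest : List Int) (visCur : List Int) (K : List (Int × Int)),
      pvPot adj visCur + 1 ≤ f →
      pvLoopB adj n ((rest.filter (fun v => v != pre)).map (fun v => (v, i)) ++ K) visCur =
        (match pvDfsGo pre (fun v vis' => pvDfsA adj f v i vis') rest visCur with
         | (false, _) => false
         | (true, vo) => pvLoopB adj n K vo) := by
  intro rest
  induction rest with
  | nil => intro visCur K _; simp [pvDfsGo]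
  | cons v rest ih =>
    intro visCur K hf
    by_cases hv : v == pre
    · have hfil : ((v :: rest).filter (fun x => x != pre)) = rest.filter (fun x => x != pre) := by
        have hvp : v = pre := eq_of_beq hv
        simp [List.filter_cons, hvp]
      rw [hfil]
      simp only [pvDfsGo, hv, if_true]
      exact ih visCur K hf
    · have hfil : ((v :: rest).filter (fun x => x != pre)) = v :: rest.filter (fun x => x != pre) := by
        have hvp : ¬ v = pre := by intro h; exact hv (by simp [h])
        simp [List.filter_cons, hvp]
      rw [hfil]
      simp only [List.map_cons, List.cons_append]
      rw [hMain v i visCur _ hf]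
      simp only [pvDfsGo, hv, Bool.false_eq_true, if_false]
      cases hr : pvDfsA adj f v i visCur with
      | mk b vis2 =>
        cases b
        · simp
        · have hsub2 : visCur ⊆ vis2 := by
            have hg := pvDfsA_grow adj f v i visCur
            rw [hr] at hg; exact hg
          have hmono := pvPotAux_mono adj.items
            (vis := visCur) (vis' := vis2) (fun x hx => hsub2 hx)
          have hf2 : pvPot adj vis2 + 1 ≤ f := by unfold pvPot; unfold pvPot at hf; omega
          simpa using ih vis2 K hf2

-- simulation: running B's stack loop on a frame (i, pre) is running A's dfs(i, pre)
theorem pvMain (adj : PySem.Dict Int (List Int)) (n : Int) :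
    ∀ (f : Nat) (i pre : Int) (vis : List Int) (K : List (Int × Int)),
      pvPot adj vis + 1 ≤ f →
      pvLoopB adj n ((i, pre) :: K) vis =
        (match pvDfsA adj f i pre vis with
         | (false, _) => false
         | (true, vis') => pvLoopB adj n K vis') := by
  intro f
  induction f with
  | zero => intro i pre vis K h; exact absurd h (by omega)
  | succ f ih =>
    intro i pre vis K h
    by_cases hc : i ∈ vis
    · simp [pvLoopB, pvDfsA, hc]
    · simp only [pvLoopB, pvDfsA, PySem.Set.contains_eq_listContains, List.contains_eq_mem,
        decide_eq_true_eq, hc, Bool.false_eq_true, if_false, if_neg hc]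
      by_cases hl : adj.getD i [] = []
      · simp [hl, pvDfsGo]
      · have hlt := pvPot_add_lt adj rfl hl hc
        have hlen : 1 ≤ (adj.getD i []).length := List.length_pos_iff.2 hl
        have hf2 : pvPot adj (PySem.Set.add vis i) + 1 ≤ f := by omega
        exact pvSub adj n f i pre ih (adj.getD i []) (PySem.Set.add vis i) K hf2

-- ===== VERDICT (by name: the statement is the Claim_ definition above) =====
theorem validTree_spec : Claim_equal_validTree := by
  intro n edges _ _
  unfold Spec_validTree validTree validTree_alt
  have h := pvMain (pvBuildAdj n edges) n (pvPot (pvBuildAdj n edges) [] + 1) 0 (-1) [] []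
    (by omega)
  simp only [h]
  cases hr : pvDfsA (pvBuildAdj n edges) (pvPot (pvBuildAdj n edges) [] + 1) 0 (-1) [] with
  | mk b vis' => cases b <;> simp [pvLoopB]
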